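-- pv_equiv track=rewrite | github.com/jorge-co/ProyectoSistemasInteligentes | crucigrama.py | buscarInterseccion
-- ===== SOURCE A (Python) =====
-- def buscarInterseccion(crucigrama, buscarpalabra, intersecciones):
--     coincidencias=[]
--     posicion=[]
--     for letrap in buscarpalabra:
--         row=0
--         for fila in crucigrama:
--             col=0
--             for letraf in fila:
--                 entrada=[]
--                 #validar que esa interseccion no este ocupada
--                 if letraf==letrap and [row,col] not in intersecciones:
--                     entrada.append(row)
--                     entrada.append(col)
--                     coincidencias.append(entrada)
--                     posicion.append(buscarpalabra.index(letrap))
--                 col+=1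
--             row+=1
--     return posicion, coincidencias #posicion de letra en la palabra y posicion del tablero (fila,col)
-- ===== SOURCE B (Python) =====
-- def buscarInterseccion(crucigrama, buscarpalabra, intersecciones):
--     # One grid scan builds letter -> free positions; per word letter it's a lookup.
--     ocupadas = {tuple(p) for p in intersecciones}
--     celdas = [(ch, [r, c])
--               for r, fila in enumerate(crucigrama)
--               for c, ch in enumerate(fila)
--               if (r, c) not in ocupadas]
--     por_letra = {}
--     for ch, pos in celdas:
--         por_letra.setdefault(ch, []).append(pos)
--     primera = {}
--     for i, ch in enumerate(buscarpalabra):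
--         primera.setdefault(ch, i)
--     posicion = []
--     coincidencias = []
--     for ch in buscarpalabra:
--         matches = por_letra.get(ch, [])
--         posicion += [primera[ch]] * len(matches)
--         coincidencias += matches
--     return posicion, coincidencias
-- ===== Notes on version B (the rewrite author's own statement) =====
-- stated objective: faster
-- what changed: B scans the grid once into a letter-to-free-positions dict (membership in a set of occupied cells) plus a first-index dict for the word, then answers each word letter by lookup, instead of A's per-letter full grid scan with a linear 'not in intersecciones' test and a word.index call per match.
import Mathlib
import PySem

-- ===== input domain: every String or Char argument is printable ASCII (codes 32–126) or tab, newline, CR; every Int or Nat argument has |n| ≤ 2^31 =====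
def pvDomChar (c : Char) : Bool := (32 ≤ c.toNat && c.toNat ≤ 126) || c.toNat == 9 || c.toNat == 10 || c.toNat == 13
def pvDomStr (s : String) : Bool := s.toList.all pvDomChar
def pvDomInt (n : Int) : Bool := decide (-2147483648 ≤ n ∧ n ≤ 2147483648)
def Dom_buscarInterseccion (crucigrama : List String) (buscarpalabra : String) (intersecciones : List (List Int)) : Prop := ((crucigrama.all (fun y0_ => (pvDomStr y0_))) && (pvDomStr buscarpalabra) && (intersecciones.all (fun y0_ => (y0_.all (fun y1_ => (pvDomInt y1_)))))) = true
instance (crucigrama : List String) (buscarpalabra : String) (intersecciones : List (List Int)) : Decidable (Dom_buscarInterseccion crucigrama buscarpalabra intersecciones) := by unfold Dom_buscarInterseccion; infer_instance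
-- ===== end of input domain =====

-- B replaces A's per-letter grid rescan by one grid scan into a letter→positions dict plus a
-- first-index dict for the word; the return values are proved equal on all inputs.

-- ===== PORT A =====
-- literal transliteration: three nested loops with row/col counters; buscarpalabra.index(letrap)
-- always succeeds (letrap comes from buscarpalabra), hence the getD 0 never fires.
def buscarInterseccion (crucigrama : List String) (buscarpalabra : String) (intersecciones : List (List Int)) : List Int × List (List Int) :=
  let st := buscarpalabra.toList.foldl
    (fun (cp : List (List Int) × List Int) letrap =>
      (crucigrama.foldl
        (fun (s : (List (List Int) × List Int) × Int) fila =>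
          ((fila.toList.foldl
              (fun (t : (List (List Int) × List Int) × Int) letraf =>
                (if letraf = letrap ∧ [s.2, t.2] ∉ intersecciones then
                    (t.1.1 ++ [[s.2, t.2]],
                     t.1.2 ++ [(((PySem.List.index? buscarpalabra.toList letrap).getD 0 : Nat) : Int)])
                  else t.1,
                 t.2 + 1))
              (s.1, 0)).1,
           s.2 + 1))
        (cp, 0)).1)
    ([], [])
  (st.2, st.1)

-- ===== PORT B =====
-- literal transliteration of Source B; Python's set of tuples tuple(p) keeps the elements of p,
-- so it is modelled as PySem.Set (List Int), and '(r, c) not in ocupadas' as contains ocupadas [r, c].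
def buscarInterseccion_alt (crucigrama : List String) (buscarpalabra : String) (intersecciones : List (List Int)) : List Int × List (List Int) :=
  let ocupadas : PySem.Set (List Int) := PySem.Set.ofList intersecciones
  let celdas : List (Char × List Int) :=
    (PySem.List.enumerate crucigrama).flatMap (fun rp =>
      ((PySem.List.enumerate rp.2.toList).filter
          (fun cp => !(PySem.Set.contains ocupadas [rp.1, cp.1]))).map
        (fun cp => (cp.2, [rp.1, cp.1])))
  let porLetra : PySem.Dict Char (List (List Int)) :=
    celdas.foldl (fun d p => d.modify p.1 [] (· ++ [p.2])) PySem.Dict.empty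
  let primera : PySem.Dict Char Int :=
    (PySem.List.enumerate buscarpalabra.toList).foldl
      (fun d ip => d.setdefault ip.2 ip.1) PySem.Dict.empty
  buscarpalabra.toList.foldl
    (fun (acc : List Int × List (List Int)) ch =>
      let ms := porLetra.getD ch []
      (acc.1 ++ List.replicate ms.length (primera.getD ch 0),
       acc.2 ++ ms))
    ([], [])

-- ===== PRECONDITION & SPEC =====
def Spec_buscarInterseccion (crucigrama : List String) (buscarpalabra : String) (intersecciones : List (List Int)) (out : List Int × List (List Int)) : Prop := out = buscarInterseccion_alt crucigrama buscarpalabra intersecciones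
instance (crucigrama : List String) (buscarpalabra : String) (intersecciones : List (List Int)) (out : List Int × List (List Int)) : Decidable (Spec_buscarInterseccion crucigrama buscarpalabra intersecciones out) := by unfold Spec_buscarInterseccion; infer_instance

-- ===== CLAIM (what is proved, stated in full; the proofs are below) =====
def Claim_equal_buscarInterseccion : Prop := ∀ (crucigrama : List String) (buscarpalabra : String) (intersecciones : List (List Int)), Dom_buscarInterseccion crucigrama buscarpalabra intersecciones → Spec_buscarInterseccion crucigrama buscarpalabra intersecciones (buscarInterseccion crucigrama buscarpalabra intersecciones)

-- ===== LEMMAS AND PROOFS =====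

/-- Matches of letter `letrap` in one row `cs` at row index `r`, columns counted from `c0`. -/
def pvRowM (inter : List (List Int)) (letrap : Char) (r : Int) (cs : List Char) (c0 : Int) : List (List Int) :=
  ((PySem.List.enumerate cs c0).filter
      (fun cp => decide (cp.2 = letrap ∧ [r, cp.1] ∉ inter))).map (fun cp => [r, cp.1])

/-- Matches of letter `letrap` over the whole grid, rows counted from `r0`. -/
def pvG (inter : List (List Int)) (letrap : Char) (rows : List String) (r0 : Int) : List (List Int) :=
  (PySem.List.enumerate rows r0).flatMap (fun rp => pvRowM inter letrap rp.1 rp.2.toList 0)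

/-- The index value A appends for letter `ch` of the word. -/
def pvIdx (w : List Char) (ch : Char) : Int :=
  (((PySem.List.index? w ch).getD 0 : Nat) : Int)

lemma pvRowM_cons (inter : List (List Int)) (letrap : Char) (r : Int) (a : Char) (cs : List Char) (c0 : Int) :
    pvRowM inter letrap r (a :: cs) c0 =
      (if a = letrap ∧ [r, c0] ∉ inter then [[r, c0]] else []) ++ pvRowM inter letrap r cs (c0 + 1) := by
  simp only [pvRowM, PySem.List.enumerate_cons, List.filter_cons]
  by_cases h : a = letrap ∧ [r, c0] ∉ inter <;> simp [h]

lemma pvA_rowLoop (inter : List (List Int)) (letrap : Char) (idx r : Int) :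
    ∀ (cs : List Char) (c0 : Int) (co : List (List Int)) (po : List Int),
      (cs.foldl
        (fun (t : (List (List Int) × List Int) × Int) letraf =>
          (if letraf = letrap ∧ [r, t.2] ∉ inter then
              (t.1.1 ++ [[r, t.2]], t.1.2 ++ [idx])
            else t.1,
           t.2 + 1))
        ((co, po), c0)) =
      ((co ++ pvRowM inter letrap r cs c0,
        po ++ List.replicate (pvRowM inter letrap r cs c0).length idx),
       c0 + cs.length) := by
  intro cs
  induction cs with
  | nil => intro c0 co po; simp [pvRowM]
  | cons a cs ih =>
    intro c0 co po
    rw [List.foldl_cons, pvRowM_cons]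
    by_cases h : a = letrap ∧ [r, c0] ∉ inter
    · simp only [if_pos h, ih]
      simp [List.replicate_succ, List.append_assoc]
      omega
    · simp only [if_neg h, ih]
      simp
      omega

lemma pvA_gridLoop (inter : List (List Int)) (letrap : Char) (idx : Int) :
    ∀ (rows : List String) (r0 : Int) (co : List (List Int)) (po : List Int),
      (rows.foldl
        (fun (s : (List (List Int) × List Int) × Int) fila =>
          ((fila.toList.foldl
              (fun (t : (List (List Int) × List Int) × Int) letraf =>
                (if letraf = letrap ∧ [s.2, t.2] ∉ inter then
                    (t.1.1 ++ [[s.2, t.2]], t.1.2 ++ [idx])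
                  else t.1,
                 t.2 + 1))
              (s.1, 0)).1,
           s.2 + 1))
        ((co, po), r0)) =
      ((co ++ pvG inter letrap rows r0,
        po ++ List.replicate (pvG inter letrap rows r0).length idx),
       r0 + rows.length) := by
  intro rows
  induction rows with
  | nil => intro r0 co po; simp [pvG]
  | cons fila rows ih =>
    intro r0 co po
    rw [List.foldl_cons]
    have hrow := pvA_rowLoop inter letrap idx r0 fila.toList 0 co po
    simp only [hrow]
    simp only [ih]
    simp [pvG, PySem.List.enumerate_cons, List.replicate_append_replicate, List.append_assoc]
    omega

/-- A computes the canonical pair of flatMaps. -/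
lemma pvA_eq (crucigrama : List String) (buscarpalabra : String) (inter : List (List Int)) :
    buscarInterseccion crucigrama buscarpalabra inter =
      (buscarpalabra.toList.flatMap
         (fun ch => List.replicate (pvG inter ch crucigrama 0).length (pvIdx buscarpalabra.toList ch)),
       buscarpalabra.toList.flatMap (fun ch => pvG inter ch crucigrama 0)) := by
  unfold buscarInterseccion
  have hstep : (fun (cp : List (List Int) × List Int) (letrap : Char) =>
      (crucigrama.foldl
        (fun (s : (List (List Int) × List Int) × Int) fila =>
          ((fila.toList.foldl
              (fun (t : (List (List Int) × List Int) × Int) letraf =>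
                (if letraf = letrap ∧ [s.2, t.2] ∉ inter then
                    (t.1.1 ++ [[s.2, t.2]],
                     t.1.2 ++ [(((PySem.List.index? buscarpalabra.toList letrap).getD 0 : Nat) : Int)])
                  else t.1,
                 t.2 + 1))
              (s.1, 0)).1,
           s.2 + 1))
        (cp, 0)).1) =
      fun (cp : List (List Int) × List Int) (letrap : Char) =>
        (cp.1 ++ pvG inter letrap crucigrama 0,
         cp.2 ++ List.replicate (pvG inter letrap crucigrama 0).length (pvIdx buscarpalabra.toList letrap)) := by
    funext cp letrap
    have h := pvA_gridLoop inter letrap (pvIdx buscarpalabra.toList letrap) crucigrama 0 cp.1 cp.2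
    simp only [pvIdx] at h
    simpa using congrArg Prod.fst h
  rw [hstep]
  rw [PySem.List.foldl_prod_mk
        (f := fun c letrap => c ++ pvG inter letrap crucigrama 0)
        (g := fun p letrap => p ++ List.replicate (pvG inter letrap crucigrama 0).length (pvIdx buscarpalabra.toList letrap))]
  simp [List.flatMap_def]

/-- One row of B's `celdas`, filtered to letter `ch` and projected, is `pvRowM`. -/
lemma pvB_row (inter : List (List Int)) (ch : Char) (r : Int) (cs : List Char) :
    ((((PySem.List.enumerate cs 0).filter
          (fun cp => !(PySem.Set.contains (PySem.Set.ofList inter) [r, cp.1]))).map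
        (fun cp => (cp.2, [r, cp.1]))).filter (fun p => p.1 == ch)).map (fun p => p.2)
      = pvRowM inter ch r cs 0 := by
  rw [List.filter_map, List.map_map, List.filter_filter, pvRowM]
  congr 1
  apply List.filter_congr
  intro cp _
  simp [PySem.Set.contains, PySem.Set.mem_ofList, Function.comp]
  tauto

/-- B's grouping dict looked up at `ch` gives exactly the grid matches of `ch`. -/
lemma pvB_porLetra (crucigrama : List String) (inter : List (List Int)) (ch : Char) :
    (((PySem.List.enumerate crucigrama).flatMap (fun rp =>
        ((PySem.List.enumerate rp.2.toList).filter
            (fun cp => !(PySem.Set.contains (PySem.Set.ofList inter) [rp.1, cp.1]))).map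
          (fun cp => (cp.2, [rp.1, cp.1])))).foldl
        (fun d p => d.modify p.1 [] (· ++ [p.2])) PySem.Dict.empty).getD ch []
      = pvG inter ch crucigrama 0 := by
  rw [PySem.Dict.getD_foldl_modify_append, PySem.Dict.getD_empty, List.nil_append]
  rw [List.filter_flatMap, List.map_flatMap, pvG]
  apply List.flatMap_congr
  intro rp _
  exact pvB_row inter ch rp.1 rp.2.toList

/-- A `setdefault` loop keeps the first value bound to each key. -/
lemma pvSetdefault_get? (c : Char) :
    ∀ (l : List (Int × Char)) (d : PySem.Dict Char Int),
      (l.foldl (fun d ip => d.setdefault ip.2 ip.1) d).get? c =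
        (d.get? c).or ((l.find? (fun ip => ip.2 == c)).map (fun ip => ip.1)) := by
  intro l
  induction l with
  | nil => intro d; simp
  | cons a l ih =>
    intro d
    rw [List.foldl_cons, ih, List.find?_cons]
    by_cases h : a.2 = c
    · subst h
      rw [PySem.Dict.get?_setdefault_self]
      cases d.get? a.2 <;> simp
    · have hb : (a.2 == c) = false := beq_eq_false_iff_ne.2 h
      rw [PySem.Dict.get?_setdefault_of_ne _ _ (fun hc => h hc.symm)]
      simp [hb]

/-- `find?` on an enumeration finds the first index, i.e. `index?`, shifted by the start. -/
lemma pvFind?_enumerate (c : Char) :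
    ∀ (cs : List Char) (k : Int), c ∈ cs →
      (PySem.List.enumerate cs k).find? (fun ip => ip.2 == c) =
        some (k + (((PySem.List.index? cs c).getD 0 : Nat) : Int), c) := by
  intro cs
  induction cs with
  | nil => intro k h; simp at h
  | cons a cs ih =>
    intro k h
    rw [PySem.List.enumerate_cons, List.find?_cons]
    by_cases ha : a = c
    · subst ha
      rw [PySem.List.index?_cons_self]
      simp
    · have hb : (a == c) = false := beq_eq_false_iff_ne.2 ha
      have hc : c ∈ cs := by cases h with | head => exact absurd rfl ha | tail _ h => exact h
      obtain ⟨n, hn⟩ := Option.isSome_iff_exists.1 ((PySem.List.index?_isSome_iff cs c).2 hc)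
      rw [PySem.List.index?_cons_of_ne _ ha, ih (k + 1) hc, hn]
      simp only [hb, Option.map_some, Option.getD_some]
      congr 2
      push_cast
      ring

/-- B's `primera` dict looked up at a letter of the word is A's `index` value. -/
lemma pvB_primera (w : List Char) (ch : Char) (h : ch ∈ w) :
    ((PySem.List.enumerate w).foldl (fun d ip => d.setdefault ip.2 ip.1) PySem.Dict.empty).getD ch 0
      = pvIdx w ch := by
  rw [PySem.Dict.getD_eq_get?_getD, pvSetdefault_get?, PySem.Dict.get?_empty]
  rw [pvFind?_enumerate ch w 0 h]
  simp [pvIdx]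

/-- The final lookup loop of B, for pointwise-equal (on the word) lookup functions. -/
lemma pvB_loop (P G : Char → List (List Int)) (I J : Char → Int) :
    ∀ (w : List Char), (∀ ch ∈ w, P ch = G ch) → (∀ ch ∈ w, I ch = J ch) →
      ∀ (acc : List Int × List (List Int)),
        w.foldl (fun acc ch => (acc.1 ++ List.replicate (P ch).length (I ch), acc.2 ++ P ch)) acc
          = (acc.1 ++ w.flatMap (fun ch => List.replicate (G ch).length (J ch)),
             acc.2 ++ w.flatMap G) := by
  intro w
  induction w with
  | nil => intro _ _ acc; simp
  | cons a w ih =>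
    intro hP hI acc
    rw [List.foldl_cons, hP a (List.mem_cons_self), hI a (List.mem_cons_self),
        ih (fun ch hch => hP ch (List.mem_cons_of_mem a hch))
           (fun ch hch => hI ch (List.mem_cons_of_mem a hch))]
    simp [List.append_assoc]

/-- B computes the same canonical pair of flatMaps. -/
lemma pvB_eq (crucigrama : List String) (buscarpalabra : String) (inter : List (List Int)) :
    buscarInterseccion_alt crucigrama buscarpalabra inter =
      (buscarpalabra.toList.flatMap
         (fun ch => List.replicate (pvG inter ch crucigrama 0).length (pvIdx buscarpalabra.toList ch)),
       buscarpalabra.toList.flatMap (fun ch => pvG inter ch crucigrama 0)) := by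
  simp only [buscarInterseccion_alt]
  have := pvB_loop
    (fun ch => (((PySem.List.enumerate crucigrama).flatMap (fun rp =>
        ((PySem.List.enumerate rp.2.toList).filter
            (fun cp => !(PySem.Set.contains (PySem.Set.ofList inter) [rp.1, cp.1]))).map
          (fun cp => (cp.2, [rp.1, cp.1])))).foldl
        (fun d p => d.modify p.1 [] (· ++ [p.2])) PySem.Dict.empty).getD ch [])
    (fun ch => pvG inter ch crucigrama 0)
    (fun ch => ((PySem.List.enumerate buscarpalabra.toList).foldl
        (fun d ip => d.setdefault ip.2 ip.1) PySem.Dict.empty).getD ch 0)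
    (fun ch => pvIdx buscarpalabra.toList ch)
    buscarpalabra.toList
    (fun ch _ => pvB_porLetra crucigrama inter ch)
    (fun ch hch => pvB_primera buscarpalabra.toList ch hch)
    ([], [])
  simpa using this

-- ===== VERDICT (by name: the statement is the Claim_ definition above) =====
theorem buscarInterseccion_spec : Claim_equal_buscarInterseccion := by
  intro crucigrama buscarpalabra intersecciones _
  unfold Spec_buscarInterseccion
  rw [pvA_eq, pvB_eq]
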